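-- pv_equiv track=rewrite | github.com/Manyawaldia/AI | HW1/p1_statespace.py | xfer
-- ===== SOURCE A (Python) =====
-- import copy
--
-- def xfer(state,max,source,dest):
--     state2 = copy.deepcopy(state)
--     #transfer from source to dest until dest is full or source is empty
--     i = state2[dest]
--     j = max[dest]
--     while i < j:
--         state2[dest] += 1
--         state2[source] -= 1
--         i += 1
--
--     return(state2)
-- ===== SOURCE B (Python) =====
-- def xfer(state, max, source, dest):
--     # O(1): fill dest to its max in one arithmetic step instead of looping unit transfers
--     t = max[dest] - state[dest]
--     if t <= 0:
--         return list(state)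
--     out = list(state)
--     out[dest] = max[dest]
--     out[source] -= t
--     return out
-- ===== Notes on version B (the rewrite author's own statement) =====
-- stated objective: faster
-- what changed: A transfers one unit per loop iteration until dest reaches its max; B computes the transferred amount t = max[dest]-state[dest] once and applies it in a single arithmetic update (dest := max[dest], source -= t), guarding t <= 0.
import Mathlib
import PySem

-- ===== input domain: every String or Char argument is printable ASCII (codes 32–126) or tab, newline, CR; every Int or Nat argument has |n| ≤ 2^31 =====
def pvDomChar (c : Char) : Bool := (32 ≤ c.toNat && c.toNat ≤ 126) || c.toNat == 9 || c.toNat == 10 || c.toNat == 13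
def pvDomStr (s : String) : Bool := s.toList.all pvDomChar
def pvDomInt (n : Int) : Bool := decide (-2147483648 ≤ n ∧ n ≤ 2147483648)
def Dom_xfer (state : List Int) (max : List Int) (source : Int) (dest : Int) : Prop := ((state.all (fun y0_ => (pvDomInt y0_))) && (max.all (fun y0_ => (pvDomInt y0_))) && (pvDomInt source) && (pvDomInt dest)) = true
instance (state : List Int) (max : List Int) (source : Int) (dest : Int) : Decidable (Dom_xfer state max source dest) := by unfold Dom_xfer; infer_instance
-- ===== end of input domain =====

-- B replaces A's one-unit-at-a-time transfer loop with a single O(1) arithmetic update (objective: faster).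

-- ===== PORT A =====
-- the 'while i < j' loop: each step does state2[dest] += 1; state2[source] -= 1; i += 1
def xferLoop (state2 : List Int) (source dest : Int) (i j : Int) : List Int :=
  if i < j then
    xferLoop
      (PySem.List.pySetD
        (PySem.List.pySetD state2 dest (PySem.List.pyGetD state2 dest 0 + 1))
        source
        (PySem.List.pyGetD (PySem.List.pySetD state2 dest (PySem.List.pyGetD state2 dest 0 + 1)) source 0 - 1))
      source dest (i + 1) j
  else state2
termination_by (j - i).toNat
decreasing_by omega

def xfer (state : List Int) (max : List Int) (source : Int) (dest : Int) : List Int :=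
  let state2 := state
  let i := PySem.List.pyGetD state2 dest 0
  let j := PySem.List.pyGetD max dest 0
  xferLoop state2 source dest i j

-- ===== PORT B =====
def xfer_alt (state : List Int) (max : List Int) (source : Int) (dest : Int) : List Int :=
  let t := PySem.List.pyGetD max dest 0 - PySem.List.pyGetD state dest 0
  if t ≤ 0 then state
  else
    let out := PySem.List.pySetD state dest (PySem.List.pyGetD max dest 0)
    PySem.List.pySetD out source (PySem.List.pyGetD out source 0 - t)

-- ===== PRECONDITION & SPEC =====
-- Pre_ excludes exactly the inputs where A raises IndexError: dest out of range for state or max,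
-- or (a transfer actually happens and) source out of range for state.
def Pre_xfer (state : List Int) (max : List Int) (source : Int) (dest : Int) : Prop :=
  PySem.Raise.InRange state.length dest ∧ PySem.Raise.InRange max.length dest ∧
  (PySem.List.pyGetD state dest 0 < PySem.List.pyGetD max dest 0 →
    PySem.Raise.InRange state.length source)
instance (state : List Int) (max : List Int) (source : Int) (dest : Int) : Decidable (Pre_xfer state max source dest) := by unfold Pre_xfer; infer_instance

def pvWitness_xfer : List Int × List Int × Int × Int := ([3, 0], [5, 4], 0, 1)

def Spec_xfer (state : List Int) (max : List Int) (source : Int) (dest : Int) (out : List Int) : Prop := out = xfer_alt state max source dest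
instance (state : List Int) (max : List Int) (source : Int) (dest : Int) (out : List Int) : Decidable (Spec_xfer state max source dest out) := by unfold Spec_xfer; infer_instance

-- ===== CLAIM (what is proved, stated in full; the proofs are below) =====
def Claim_equal_xfer : Prop := ∀ (state : List Int) (max : List Int) (source : Int) (dest : Int), Dom_xfer state max source dest → Pre_xfer state max source dest → Spec_xfer state max source dest (xfer state max source dest)

-- ===== LEMMAS AND PROOFS =====

-- normalized (Python) index as a Nat, valid under InRange
def pvNorm (L : Nat) (i : Int) : Nat := if 0 ≤ i then i.toNat else L - (-i).toNat

theorem pvNorm_lt {L : Nat} {i : Int} (h : PySem.Raise.InRange L i) : pvNorm L i < L := by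
  rcases h with ⟨h1, h2⟩
  unfold pvNorm; split <;> omega

theorem pyIdx?_eq {L : Nat} {i : Int} (h : PySem.Raise.InRange L i) :
    PySem.List.pyIdx? L i = some (pvNorm L i) := by
  rcases h with ⟨h1, h2⟩
  simp only [PySem.List.pyIdx?, pvNorm]
  split <;> simp

theorem pyGetD_norm {xs : List Int} {i : Int} (d : Int) (h : PySem.Raise.InRange xs.length i) :
    PySem.List.pyGetD xs i d = xs.getD (pvNorm xs.length i) d := by
  simp [PySem.List.pyGetD, PySem.List.pyGet?, pyIdx?_eq h, List.getD]

theorem pySetD_norm {xs : List Int} {i : Int} (v : Int) (h : PySem.Raise.InRange xs.length i) :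
    PySem.List.pySetD xs i v = xs.set (pvNorm xs.length i) v := by
  simp [PySem.List.pySetD, PySem.List.pySet?, pyIdx?_eq h]

-- the loop when source and dest denote the same cell: state2 is unchanged
theorem xferLoop_same (s : List Int) (source dest : Int) (i j : Int) (nd : Nat)
    (hnd : nd < s.length)
    (hdn : pvNorm s.length dest = nd) (hsn : pvNorm s.length source = nd)
    (hd : PySem.Raise.InRange s.length dest) (hs : PySem.Raise.InRange s.length source) :
    xferLoop s source dest i j = s := by
  by_cases hij : i < j
  · rw [xferLoop, if_pos hij]
    have hstep : (PySem.List.pySetD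
        (PySem.List.pySetD s dest (PySem.List.pyGetD s dest 0 + 1))
        source
        (PySem.List.pyGetD (PySem.List.pySetD s dest (PySem.List.pyGetD s dest 0 + 1)) source 0 - 1)) = s := by
      rw [pySetD_norm _ hd, hdn, pyGetD_norm _ hd, hdn]
      have hd' : PySem.Raise.InRange (s.set nd (s.getD nd 0 + 1)).length source := by
        simpa using hs
      rw [pyGetD_norm _ hd', pySetD_norm _ hd']
      simp only [List.length_set, hsn]
      have : (s.set nd (s.getD nd 0 + 1)).getD nd 0 = s.getD nd 0 + 1 := by
        simp [List.getD, hnd]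
      rw [this]
      have : s.getD nd 0 + 1 - 1 = s.getD nd 0 := by ring
      rw [this, List.set_set]
      have : s.getD nd 0 = s[nd] := by simp [List.getD, List.getElem?_eq_getElem hnd]
      rw [this, List.set_getElem_self]
    rw [hstep]
    exact xferLoop_same s source dest (i + 1) j nd hnd hdn hsn hd hs
  · rw [xferLoop, if_neg hij]
termination_by (j - i).toNat
decreasing_by omega

-- the loop when source and dest denote different cells: closed form
theorem xferLoop_diff (s : List Int) (source dest : Int) (i j : Int) (nd sd : Nat)
    (hnd : nd < s.length) (hsd : sd < s.length) (hne : nd ≠ sd)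
    (hdn : pvNorm s.length dest = nd) (hsn : pvNorm s.length source = sd)
    (hd : PySem.Raise.InRange s.length dest) (hs : PySem.Raise.InRange s.length source)
    (hij : i < j) :
    xferLoop s source dest i j =
      (s.set nd (s.getD nd 0 + (j - i))).set sd (s.getD sd 0 - (j - i)) := by
  rw [xferLoop, if_pos hij]
  have hd' : PySem.Raise.InRange (s.set nd (s.getD nd 0 + 1)).length source := by
    simpa using hs
  have hstep : (PySem.List.pySetD
      (PySem.List.pySetD s dest (PySem.List.pyGetD s dest 0 + 1))
      source
      (PySem.List.pyGetD (PySem.List.pySetD s dest (PySem.List.pyGetD s dest 0 + 1)) source 0 - 1)) =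
      (s.set nd (s.getD nd 0 + 1)).set sd (s.getD sd 0 - 1) := by
    rw [pySetD_norm _ hd, hdn, pyGetD_norm _ hd, hdn]
    rw [pyGetD_norm _ hd', pySetD_norm _ hd']
    simp only [List.length_set, hsn]
    have : (s.set nd (s.getD nd 0 + 1)).getD sd 0 = s.getD sd 0 := by
      simp [List.getD, List.getElem?_set_ne (by omega : nd ≠ sd)]
    rw [this]
  rw [hstep]
  set s1 := (s.set nd (s.getD nd 0 + 1)).set sd (s.getD sd 0 - 1) with hs1
  have hlen1 : s1.length = s.length := by simp [hs1]
  by_cases hij2 : i + 1 < j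
  · have := xferLoop_diff s1 source dest (i + 1) j nd sd
      (by omega) (by omega) hne
      (by rw [hlen1, hdn]) (by rw [hlen1, hsn])
      (by rw [hlen1]; exact hd) (by rw [hlen1]; exact hs) hij2
    rw [this]
    have hne' : sd ≠ nd := Ne.symm hne
    have g1 : s1.getD nd 0 = s.getD nd 0 + 1 := by
      simp [hs1, List.getD, hnd, hsd, hne']
    have g2 : s1.getD sd 0 = s.getD sd 0 - 1 := by
      simp [hs1, List.getD, hsd]
    rw [g1, g2, hs1]
    apply List.ext_getElem
    · simp
    · intro k hk1 hk2
      simp only [List.getElem_set]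
      split_ifs <;> ring
  · rw [xferLoop, if_neg hij2]
    have hji : j - i = 1 := by omega
    rw [hji]
termination_by (j - i).toNat
decreasing_by omega

-- ===== VERDICT (by name: the statement is the Claim_ definition above) =====
theorem xfer_spec : Claim_equal_xfer := by
  intro state max source dest _ hpre
  rcases hpre with ⟨hd, hdm, hsrc⟩
  unfold Spec_xfer xfer xfer_alt
  simp only []
  set i := PySem.List.pyGetD state dest 0 with hi
  set j := PySem.List.pyGetD max dest 0 with hj
  by_cases hij : i < j
  · have hs : PySem.Raise.InRange state.length source := hsrc hij
    have hnd := pvNorm_lt hd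
    have hsd := pvNorm_lt hs
    rw [if_neg (by omega : ¬ j - i ≤ 0)]
    by_cases hne : pvNorm state.length dest = pvNorm state.length source
    · -- same cell: A leaves state unchanged; B sets it to max then back down
      rw [xferLoop_same state source dest i j (pvNorm state.length dest) hnd rfl hne.symm hd hs]
      set nd := pvNorm state.length dest with hndn
      have hset : PySem.List.pySetD state dest j = state.set nd j := pySetD_norm _ hd
      rw [hset]
      have hs' : PySem.Raise.InRange (state.set nd j).length source := by simpa using hs
      rw [pyGetD_norm _ hs', pySetD_norm _ hs']
      simp only [List.length_set, ← hne]
      have hg : (state.set nd j).getD nd 0 = j := by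
        simp [List.getD, hnd]
      rw [hg, List.set_set]
      have hiv : i = state.getD nd 0 := by rw [hi, pyGetD_norm _ hd]
      have : j - (j - i) = i := by ring
      rw [this, hiv]
      have : state.getD nd 0 = state[nd] := by
        simp [List.getD, List.getElem?_eq_getElem hnd]
      rw [this, List.set_getElem_self]
    · -- different cells
      rw [xferLoop_diff state source dest i j (pvNorm state.length dest)
        (pvNorm state.length source) hnd hsd hne rfl rfl hd hs hij]
      set nd := pvNorm state.length dest with hndn
      set sd := pvNorm state.length source with hsdn
      rw [pySetD_norm _ hd]
      have hs' : PySem.Raise.InRange (state.set nd j).length source := by simpa using hs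
      rw [pyGetD_norm _ hs', pySetD_norm _ hs']
      simp only [List.length_set]
      have hg : (state.set nd j).getD sd 0 = state.getD sd 0 := by
        simp [List.getD, List.getElem?_set_ne (by omega : nd ≠ sd)]
      rw [hg]
      have hiv : i = state.getD nd 0 := by rw [hi, pyGetD_norm _ hd]
      have : state.getD nd 0 + (j - i) = j := by rw [← hiv]; ring
      rw [this]
  · rw [xferLoop, if_neg hij, if_pos (by omega : j - i ≤ 0)]
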